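-- pv_equiv track=rewrite | github.com/Saradiaa20/DevEase-GP-25 | code_smell_detector.py | _find_function_end_php
-- ===== SOURCE A (Python) =====
-- def _find_function_end_php(content, start_pos):
--     """Find the end of a PHP function"""
--     brace_count = 0
--     in_function = False
--
--     for i, char in enumerate(content[start_pos:], start_pos):
--         if char == '{':
--             brace_count += 1
--             in_function = True
--         elif char == '}':
--             brace_count -= 1
--             if in_function and brace_count == 0:
--                 return content[:i].count('\n') + 1
--
--     return content.count('\n')
-- ===== SOURCE B (Python) =====
-- def _find_function_end_php(content, start_pos):
--     """Line-based scan: count the starting line once, then walk the remainder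
--     line by line tracking the line index directly."""
--     sl = content[:start_pos].count('\n')
--     lines = content[start_pos:].split('\n')
--     depth = 0
--     seen = False
--     for k, line in enumerate(lines):
--         for ch in line:
--             if ch == '{':
--                 depth += 1
--                 seen = True
--             elif ch == '}':
--                 depth -= 1
--                 if seen and depth == 0:
--                     return sl + k + 1
--     return sl + len(lines) - 1
-- ===== Notes on version B (the rewrite author's own statement) =====
-- stated objective: alternative
-- what changed: A scans characters from start_pos with an absolute index and re-counts newlines of the whole prefix content[:i] on finding the closing brace; B splits the remainder into lines once and walks line by line, returning the tracked line index directly. Pre_ excludes start_pos < -len(content), where A's line number is an accident of Python's negative-slice wraparound in content[:i].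
-- outside the precondition, e.g. on _find_function_end_php('{\n}', -10): A returns 1, B returns 2
import Mathlib
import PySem

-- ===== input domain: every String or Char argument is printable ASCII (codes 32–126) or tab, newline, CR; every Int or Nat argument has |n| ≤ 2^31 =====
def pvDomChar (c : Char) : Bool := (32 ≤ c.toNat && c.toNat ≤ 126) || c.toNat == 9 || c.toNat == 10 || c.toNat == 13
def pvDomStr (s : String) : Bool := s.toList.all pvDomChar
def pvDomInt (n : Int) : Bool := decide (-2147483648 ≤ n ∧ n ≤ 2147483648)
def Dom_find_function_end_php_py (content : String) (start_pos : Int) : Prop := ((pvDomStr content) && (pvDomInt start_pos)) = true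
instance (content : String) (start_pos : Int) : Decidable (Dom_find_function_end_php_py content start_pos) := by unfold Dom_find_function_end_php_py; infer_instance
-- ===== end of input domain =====

-- B replaces A's indexed character scan (with a prefix newline re-count at the return
-- point) by a split-once-into-lines scan that tracks the line index directly; objective:
-- alternative decomposition, same cost.  The claim is about return values (no mutation).

-- ===== PORT A =====
-- loop body of A: for (i, char) in enumerate(content[start_pos:], start_pos): …
def findA_loop (cs : List Char) : List Char → Int → Int → Bool → Option Int
  | [], _, _, _ => none
  | c :: rest, i, brace, inf =>
    if c = '{' then findA_loop cs rest (i + 1) (brace + 1) true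
    else if c = '}' then
      if inf ∧ brace - 1 = 0 then
        some ((PySem.Chars.count (PySem.List.slice cs none (some i)) ['\n'] : Int) + 1)
      else findA_loop cs rest (i + 1) (brace - 1) inf
    else findA_loop cs rest (i + 1) brace inf

def find_function_end_php_py (content : String) (start_pos : Int) : Int :=
  let cs := content.toList
  match findA_loop cs (PySem.List.slice cs (some start_pos) none) start_pos 0 false with
  | some r => r
  | none => (PySem.Chars.count cs ['\n'] : Int)

-- ===== PORT B =====
-- inner loop of Source B (one line's characters); `none` = the `return sl + k + 1` fired
def scanLine : List Char → Int → Bool → Option (Int × Bool)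
  | [], depth, seen => some (depth, seen)
  | c :: rest, depth, seen =>
    if c = '{' then scanLine rest (depth + 1) true
    else if c = '}' then
      if seen ∧ depth - 1 = 0 then none
      else scanLine rest (depth - 1) seen
    else scanLine rest depth seen

def scanLines (sl : Int) : List (List Char) → Int → Int → Bool → Int
  | [], k, _, _ => sl + k - 1
  | l :: ls, k, depth, seen =>
    match scanLine l depth seen with
    | none => sl + k + 1
    | some (d', s') => scanLines sl ls (k + 1) d' s'

def find_function_end_php_py_alt (content : String) (start_pos : Int) : Int :=
  let cs := content.toList
  let sl : Int := (PySem.Chars.count (PySem.List.slice cs none (some start_pos)) ['\n'] : Int)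
  let rlines := PySem.Chars.splitOn (PySem.List.slice cs (some start_pos) none) ['\n']
  scanLines sl rlines 0 0 false

-- ===== PRECONDITION & SPEC =====
-- Pre_ excludes only start_pos < -len(content): there Python's slice wraparound makes A's
-- prefix content[:i] empty for the first characters scanned, so the line number A reports
-- there is an accident of the negative-index arithmetic; on every other input (including
-- ordinary negative positions -len ≤ start_pos < 0) A and B agree and that is the claim.
def Pre_find_function_end_php_py (content : String) (start_pos : Int) : Prop := -(PySem.Str.len content) ≤ start_pos
instance (content : String) (start_pos : Int) : Decidable (Pre_find_function_end_php_py content start_pos) := by unfold Pre_find_function_end_php_py; infer_instance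

def pvWitness_find_function_end_php_py : String × Int := ("function f() {\n  return 1;\n}\n", 0)

def Spec_find_function_end_php_py (content : String) (start_pos : Int) (out : Int) : Prop := out = find_function_end_php_py_alt content start_pos
instance (content : String) (start_pos : Int) (out : Int) : Decidable (Spec_find_function_end_php_py content start_pos out) := by unfold Spec_find_function_end_php_py; infer_instance

-- ===== CLAIM (what is proved, stated in full; the proofs are below) =====
def Claim_equal_find_function_end_php_py : Prop := ∀ (content : String) (start_pos : Int), Dom_find_function_end_php_py content start_pos → Pre_find_function_end_php_py content start_pos → Spec_find_function_end_php_py content start_pos (find_function_end_php_py content start_pos)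

-- ===== LEMMAS AND PROOFS =====

-- Python's s.count("\n") is the List.count of the newline character
theorem count_go_nl (fuel : Nat) : ∀ (l : List Char) (acc : Nat), l.length ≤ fuel →
    PySem.Chars.count.go ['\n'] fuel l acc = acc + l.count '\n' := by
  induction fuel with
  | zero => intro l acc h; cases l with
    | nil => simp [PySem.Chars.count.go]
    | cons c r => simp at h
  | succ f ih => intro l acc h; cases l with
    | nil => simp [PySem.Chars.count.go]
    | cons c r =>
      simp only [PySem.Chars.count.go]
      by_cases hc : c = '\n'
      · subst hc
        simp only [List.isPrefixOf, BEq.rfl, Bool.true_and, List.isPrefixOf_nil_left,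
          if_true, List.length_singleton, List.drop_succ_cons, List.drop_zero]
        rw [ih r (acc + 1) (by simpa using Nat.le_of_succ_le_succ h)]
        simp [List.count_cons]
        omega
      · have hpre : (['\n'].isPrefixOf (c :: r)) = false := by
          simp [List.isPrefixOf]; exact fun hh => hc (by simpa using hh.symm)
        rw [hpre]
        simp only [Bool.false_eq_true, if_false]
        rw [ih r acc (by simpa using Nat.le_of_succ_le_succ h)]
        simp [List.count_cons, hc]

theorem count_nl (l : List Char) : PySem.Chars.count l ['\n'] = l.count '\n' := by
  simp only [PySem.Chars.count, List.isEmpty]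
  exact (count_go_nl l.length l 0 le_rfl).trans (by omega)

-- clean structural recursion equal to Python's split('\n')
def mySplit : List Char → List (List Char)
  | [] => [[]]
  | c :: r => if c = '\n' then [] :: mySplit r else (mySplit r).modifyHead (c :: ·)

theorem mySplit_ne_nil (l : List Char) : mySplit l ≠ [] := by
  cases l with
  | nil => simp [mySplit]
  | cons c r =>
    simp only [mySplit]
    split_ifs
    · simp
    · intro h; exact mySplit_ne_nil r (by simpa using List.modifyHead_eq_nil_iff.mp h)

theorem splitOn_go_nl (fuel : Nat) : ∀ (l cur : List Char) (acc : List (List Char)),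
    l.length < fuel →
    PySem.Chars.splitOn.go ['\n'] fuel l cur acc
      = acc.reverse ++ (mySplit l).modifyHead (cur.reverse ++ ·) := by
  induction fuel with
  | zero => intro l cur acc h; omega
  | succ f ih => intro l cur acc h; cases l with
    | nil => simp [PySem.Chars.splitOn.go, mySplit]
    | cons c r =>
      simp only [PySem.Chars.splitOn.go]
      by_cases hc : c = '\n'
      · subst hc
        simp only [List.isPrefixOf, BEq.rfl, Bool.true_and, List.isPrefixOf_nil_left,
          if_true, List.length_singleton, List.drop_succ_cons, List.drop_zero]
        rw [ih r [] (cur.reverse :: acc) (by simpa using h)]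
        simp only [mySplit, if_pos rfl, List.reverse_cons, List.reverse_nil,
          List.modifyHead, List.nil_append, List.append_assoc]
        simp
        cases hms : mySplit r <;> simp [List.modifyHead]
      · have hpre : (['\n'].isPrefixOf (c :: r)) = false := by
          simp [List.isPrefixOf]; exact fun hh => hc (by simpa using hh.symm)
        rw [hpre]
        simp only [Bool.false_eq_true, if_false]
        rw [ih r (c :: cur) acc (by simpa using h)]
        simp only [mySplit, hc, if_false]
        obtain ⟨h0, t, ht⟩ : ∃ h0 t, mySplit r = h0 :: t := by
          cases hms : mySplit r with
          | nil => exact absurd hms (mySplit_ne_nil r)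
          | cons a b => exact ⟨a, b, rfl⟩
        simp [ht, List.modifyHead]

theorem splitOn_nl (l : List Char) : PySem.Chars.splitOn l ['\n'] = mySplit l := by
  rw [PySem.Chars.splitOn, splitOn_go_nl (l.length + 1) l [] [] (by omega)]
  cases hms : mySplit l <;> simp [List.modifyHead]

-- canonical single-pass scan both loops reduce to: ln = newlines seen so far
def goC : List Char → Int → Int → Bool → Option Int
  | [], _, _, _ => none
  | c :: r, ln, d, sn =>
    if c = '{' then goC r ln (d + 1) true
    else if c = '}' then
      if sn ∧ d - 1 = 0 then some (ln + 1) else goC r ln (d - 1) sn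
    else goC r (if c = '\n' then ln + 1 else ln) d sn

-- i is either the true index iN or (negative start) iN - len: content[:i] is take iN either way
theorem findA_loop_eq_goC (cs : List Char) : ∀ (rest : List Char) (iN : Nat) (i : Int),
    cs.drop iN = rest → (i = (iN : Int) ∨ i = (iN : Int) - cs.length) → ∀ (d : Int) (sn : Bool),
    findA_loop cs rest i d sn
      = goC rest (((cs.take iN).count '\n' : Nat) : Int) d sn := by
  intro rest
  induction rest with
  | nil => intro iN i h hi d sn; simp [findA_loop, goC]
  | cons c r ih =>
    intro iN i h hi d sn
    have hlt : iN < cs.length := by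
      by_contra hge
      rw [List.drop_eq_nil_of_le (by omega)] at h
      simp at h
    have hi1 : i + 1 = ((iN + 1 : Nat) : Int) ∨ i + 1 = ((iN + 1 : Nat) : Int) - cs.length := by
      rcases hi with hi | hi <;> [left; right] <;> (rw [hi]; push_cast; ring)
    have hget : cs[iN]? = some c := by rw [← List.head?_drop, h]; rfl
    have hdrop : cs.drop (iN + 1) = r := by
      rw [List.drop_add_one_eq_tail_drop, h]; rfl
    have htake : cs.take (iN + 1) = cs.take iN ++ [c] := by
      rw [List.take_add_one, hget]; rfl
    simp only [findA_loop, goC]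
    by_cases h1 : c = '{'
    · subst h1
      rw [if_pos rfl, if_pos rfl, ih (iN + 1) (i + 1) hdrop hi1, htake]
      simp [List.count_append]
    · by_cases h2 : c = '}'
      · subst h2
        rw [if_neg h1, if_neg h1, if_pos rfl, if_pos rfl]
        cases sn with
        | false =>
          rw [if_neg (by simp), if_neg (by simp), ih (iN + 1) (i + 1) hdrop hi1, htake]
          simp [List.count_append]
        | true =>
          by_cases hd : d - 1 = 0
          · rw [if_pos ⟨rfl, hd⟩, if_pos ⟨rfl, hd⟩]
            have hslice : PySem.List.slice cs none (some i) = cs.take iN := by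
              rcases hi with hi | hi
              · rw [hi, PySem.List.slice_to_natCast]
              · have hk : i = -(((cs.length - iN : Nat) : Int)) := by rw [hi]; push_cast; omega
                rw [hk, PySem.List.slice_to_neg_natCast cs (cs.length - iN) (by omega)]
                congr 1
                omega
            rw [hslice, count_nl]
          · rw [if_neg (fun hh => hd hh.2), if_neg (fun hh => hd hh.2),
              ih (iN + 1) (i + 1) hdrop hi1, htake]
            simp [List.count_append]
      · rw [if_neg h1, if_neg h1, if_neg h2, if_neg h2,
          ih (iN + 1) (i + 1) hdrop hi1, htake]
        by_cases h4 : c = '\n'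
        · subst h4; simp [List.count_append]
        · simp [List.count_append, List.count_singleton, h4]

theorem scanLines_eq_goC (sl : Int) : ∀ (rest : List Char) (k d : Int) (sn : Bool),
    scanLines sl (mySplit rest) k d sn
      = match goC rest (sl + k) d sn with
        | some r => r
        | none => sl + k + (rest.count '\n' : Int) := by
  intro rest
  induction rest with
  | nil =>
    intro k d sn
    simp only [mySplit, scanLines, scanLine, goC, List.count_nil]
    push_cast; ring
  | cons c r ih =>
    intro k d sn
    by_cases hc : c = '\n'
    · subst hc
      simp only [mySplit, if_pos rfl, if_true, scanLines, scanLine, goC,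
        if_neg (by decide : ¬('\n' : Char) = '{'), if_neg (by decide : ¬('\n' : Char) = '}')]
      rw [ih (k + 1) d sn]
      have hsh : sl + (k + 1) = sl + k + 1 := by ring
      rw [hsh]
      cases goC r (sl + k + 1) d sn <;> simp [List.count_cons] <;> push_cast <;> ring
    · obtain ⟨h0, t, ht⟩ : ∃ h0 t, mySplit r = h0 :: t := by
        cases hms : mySplit r with
        | nil => exact absurd hms (mySplit_ne_nil r)
        | cons a b => exact ⟨a, b, rfl⟩
      simp only [mySplit, hc, if_false, ht, List.modifyHead]
      by_cases h1 : c = '{'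
      · subst h1
        have hstep : scanLines sl (('{' :: h0) :: t) k d sn
            = scanLines sl (h0 :: t) k (d + 1) true := by
          simp [scanLines, scanLine]
        rw [hstep, ← ht, ih k (d + 1) true]
        simp only [goC, if_pos rfl]
        cases goC r (sl + k) (d + 1) true <;> simp [List.count_cons]
      · by_cases h2 : c = '}'
        · subst h2
          cases sn with
          | false =>
            have hstep : scanLines sl (('}' :: h0) :: t) k d false
                = scanLines sl (h0 :: t) k (d - 1) false := by
              simp [scanLines, scanLine]
            rw [hstep, ← ht, ih k (d - 1) false]
            simp only [goC, if_neg h1, if_pos rfl, if_neg (by simp : ¬(false = true ∧ d - 1 = 0))]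
            cases goC r (sl + k) (d - 1) false <;> simp [List.count_cons]
          | true =>
            by_cases hd : d - 1 = 0
            · have hstep : scanLines sl (('}' :: h0) :: t) k d true = sl + k + 1 := by
                simp [scanLines, scanLine, hd]
              rw [hstep]
              simp [goC, if_neg h1, if_pos rfl, hd]
            · have hstep : scanLines sl (('}' :: h0) :: t) k d true
                  = scanLines sl (h0 :: t) k (d - 1) true := by
                simp [scanLines, scanLine, hd]
              rw [hstep, ← ht, ih k (d - 1) true]
              simp only [goC, if_neg h1, if_pos rfl, true_and]
              rw [if_neg hd]
              cases goC r (sl + k) (d - 1) true <;> simp [List.count_cons]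
        · have hstep : scanLines sl ((c :: h0) :: t) k d sn
              = scanLines sl (h0 :: t) k d sn := by
            simp [scanLines, scanLine, h1, h2]
          rw [hstep, ← ht, ih k d sn]
          simp only [goC, if_neg h1, if_neg h2, if_neg hc]
          cases goC r (sl + k) d sn <;> simp [List.count_cons, hc]

-- both loops, started at character sN (A's running index i, B's line split), agree
theorem ports_core (cs : List Char) (sN : Nat) (i : Int)
    (hi : i = (sN : Int) ∨ i = (sN : Int) - cs.length) :
    (match findA_loop cs (cs.drop sN) i 0 false with
     | some r => r
     | none => ((cs.count '\n' : Nat) : Int))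
      = scanLines (((cs.take sN).count '\n' : Nat) : Int) (mySplit (cs.drop sN)) 0 0 false := by
  rw [findA_loop_eq_goC cs (cs.drop sN) sN i rfl hi 0 false, scanLines_eq_goC]
  have hsplit : ((cs.count '\n' : Nat) : Int)
      = (((cs.take sN).count '\n' : Nat) : Int) + (((cs.drop sN).count '\n' : Nat) : Int) := by
    conv_lhs => rw [← List.take_append_drop sN cs]
    push_cast [List.count_append]; ring
  have hz : (((cs.take sN).count '\n' : Nat) : Int) + 0
      = (((cs.take sN).count '\n' : Nat) : Int) := by ring
  rw [hz]
  cases goC (cs.drop sN) (((cs.take sN).count '\n' : Nat) : Int) 0 false <;> simp [hsplit]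

-- ===== VERDICT (by name: the statement is the Claim_ definition above) =====
theorem find_function_end_php_py_spec : Claim_equal_find_function_end_php_py := by
  intro content start_pos _hdom hpre
  unfold Spec_find_function_end_php_py
  unfold Pre_find_function_end_php_py at hpre
  rw [PySem.Str.len_eq] at hpre
  unfold find_function_end_php_py find_function_end_php_py_alt
  set cs := content.toList with hcs
  dsimp only
  by_cases hs : 0 ≤ start_pos
  · rw [PySem.List.slice_from cs hs, PySem.List.slice_to cs hs, splitOn_nl, count_nl, count_nl]
    exact ports_core cs start_pos.toNat start_pos (Or.inl (Int.toNat_of_nonneg hs).symm)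
  · -- ordinary negative position: slices are drop/take of (len + start_pos)
    have hneg : start_pos = -(((-start_pos).toNat : Nat) : Int) := by omega
    have hA : PySem.List.slice cs (some start_pos)
        = List.drop ((cs.length : Int) + start_pos).toNat cs := by
      rw [hneg, PySem.List.slice_from_neg_natCast cs (-start_pos).toNat (by omega)]
      congr 1
      omega
    have hT : PySem.List.slice cs none (some start_pos)
        = List.take ((cs.length : Int) + start_pos).toNat cs := by
      rw [hneg, PySem.List.slice_to_neg_natCast cs (-start_pos).toNat (by omega)]
      congr 1
      omega
    rw [hA, hT, splitOn_nl, count_nl, count_nl]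
    exact ports_core cs ((cs.length : Int) + start_pos).toNat start_pos (Or.inr (by omega))
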